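-- pv_equiv track=rewrite | github.com/Jun0S2/25WiSE-PyML | lecture02/scripts/insert-fixed.py | searchsorted
-- ===== SOURCE A (Python) =====
-- def append(elem, target):
--     ''''Append an element to a list.'''
--     target.append(elem)
--
-- def searchsorted(insert, target):
--     '''Find the indices for elements in insert if they were to be inserted into the sorted list `target`.
--     Assume both insert and target are sorted.
--     '''
--     result = []
--     for i, compared in enumerate(target):
--         for elem in insert[len(result):]:
--             if elem <= compared:
--                 append(i, result)
--     result += (len(insert) - len(result)) * [len(target)]
--     return result
-- ===== SOURCE B (Python) =====
-- def searchsorted(insert, target):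
--     '''Find the indices for elements in insert if they were to be inserted into the sorted list `target`.
--     Assume both insert and target are sorted.
--     Two-pointer merge: walk insert once with pointer j while scanning target. O(n+m).
--     '''
--     result = []
--     j = 0
--     n = len(insert)
--     for i, compared in enumerate(target):
--         while j < n and insert[j] <= compared:
--             result.append(i)
--             j += 1
--     result.extend([len(target)] * (n - j))
--     return result
-- ===== Notes on version B (the rewrite author's own statement) =====
-- stated objective: faster
-- what changed: Replaced A's per-target-element rescan of the remaining slice insert[len(result):] by a single two-pointer merge walking insert once with pointer j; Pre_ excludes inputs where some target value's <=-set is not a prefix of insert (only possible for unsorted insert, against the docstring's stated assumption), where A's slice-rescan assigns accidental indices.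
-- outside the precondition, e.g. on searchsorted([2, 1], [1]): A returns [0, 1], B returns [1, 1]
import Mathlib
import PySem

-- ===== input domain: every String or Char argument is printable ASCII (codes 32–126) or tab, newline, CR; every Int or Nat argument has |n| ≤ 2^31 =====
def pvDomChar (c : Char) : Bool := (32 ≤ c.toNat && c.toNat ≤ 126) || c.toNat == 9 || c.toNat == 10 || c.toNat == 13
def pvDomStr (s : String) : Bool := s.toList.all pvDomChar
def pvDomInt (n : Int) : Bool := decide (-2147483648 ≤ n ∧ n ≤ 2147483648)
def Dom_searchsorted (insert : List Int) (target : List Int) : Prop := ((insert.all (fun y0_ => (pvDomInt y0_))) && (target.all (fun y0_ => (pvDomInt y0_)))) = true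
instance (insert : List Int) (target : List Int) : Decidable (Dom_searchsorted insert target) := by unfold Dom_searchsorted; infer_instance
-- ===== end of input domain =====

-- B replaces A's rescans of insert[len(result):] for every target element by a single
-- two-pointer merge over both lists (objective: faster, O(n*m) -> O(n+m)).

-- ===== PORT A =====
-- outer 'for i, compared in enumerate(target)' as recursion with an index counter;
-- inner 'for elem in insert[len(result):]' as a foldl over the slice, appending via result ++ [i]
def searchsortedOuter (insert : List Int) : List Int → Int → List Int → List Int
  | [], _, result => result
  | compared :: rest, i, result =>
      searchsortedOuter insert rest (i + 1)
        ((PySem.List.slice insert (some (result.length : Int)) none).foldl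
          (fun r elem => if elem ≤ compared then r ++ [i] else r) result)

def searchsorted (insert : List Int) (target : List Int) : List Int :=
  let result := searchsortedOuter insert target 0 []
  result ++ List.replicate (insert.length - result.length) (target.length : Int)

-- ===== PORT B =====
-- the 'while j < n and insert[j] <= compared' pointer j is carried as the remaining suffix of insert
def altWhile (compared i : Int) : List Int → List Int → List Int × List Int
  | [], result => (result, [])
  | e :: es, result =>
      if e ≤ compared then altWhile compared i es (result ++ [i]) else (result, e :: es)

def altOuter : List Int → Int → List Int → List Int → List Int × List Int
  | [], _, rest, result => (result, rest)
  | compared :: cs, i, rest, result =>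
      let st := altWhile compared i rest result
      altOuter cs (i + 1) st.2 st.1

def searchsorted_alt (insert : List Int) (target : List Int) : List Int :=
  let st := altOuter target 0 insert []
  st.1 ++ List.replicate st.2.length (target.length : Int)

-- ===== PRECONDITION & SPEC =====
-- Pre_ excludes inputs where some target value c splits insert at more than one boundary
-- (the elements ≤ c do not form a prefix of insert) — possible only when insert is unsorted,
-- violating the docstring's 'Assume both insert and target are sorted'; there A's slice-rescan
-- assigns accidental indices that B's merge does not reproduce. Any sorted insert (with ANY
-- target, sorted or not) satisfies Pre_.
def Pre_searchsorted (insert : List Int) (target : List Int) : Prop :=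
  ∀ c ∈ target, List.Pairwise (fun a b => b ≤ c → a ≤ c) insert
instance (insert : List Int) (target : List Int) : Decidable (Pre_searchsorted insert target) := by
  unfold Pre_searchsorted; infer_instance

def pvWitness_searchsorted : List Int × List Int := ([1, 3, 3, 7], [2, 3, 5])

def Spec_searchsorted (insert : List Int) (target : List Int) (out : List Int) : Prop := out = searchsorted_alt insert target
instance (insert : List Int) (target : List Int) (out : List Int) : Decidable (Spec_searchsorted insert target out) := by unfold Spec_searchsorted; infer_instance

-- ===== CLAIM (what is proved, stated in full; the proofs are below) =====
def Claim_equal_searchsorted : Prop := ∀ (insert : List Int) (target : List Int), Dom_searchsorted insert target → Pre_searchsorted insert target → Spec_searchsorted insert target (searchsorted insert target)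

-- ===== LEMMAS AND PROOFS =====

-- A's inner fold appends nothing when every remaining element exceeds `compared`
theorem foldA_no_append (c i : Int) (l : List Int) (result : List Int)
    (h : ∀ x ∈ l, ¬ x ≤ c) :
    l.foldl (fun r elem => if elem ≤ c then r ++ [i] else r) result = result := by
  induction l generalizing result with
  | nil => rfl
  | cons e es ih =>
    simp only [List.foldl_cons]
    rw [if_neg (h e (by simp))]
    exact ih result (fun x hx => h x (by simp [hx]))

-- when the elements ≤ c form a prefix of l, A's inner fold appends i for exactly that prefix
theorem foldA_prefix (c i : Int) (l : List Int) (result : List Int)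
    (h : List.Pairwise (fun a b => b ≤ c → a ≤ c) l) :
    l.foldl (fun r elem => if elem ≤ c then r ++ [i] else r) result
      = result ++ (l.takeWhile (· ≤ c)).map (fun _ => i) := by
  induction l generalizing result with
  | nil => simp
  | cons e es ih =>
    rcases List.pairwise_cons.mp h with ⟨he, hes⟩
    simp only [List.foldl_cons]
    by_cases hc : e ≤ c
    · rw [if_pos hc, ih _ hes, List.takeWhile_cons_of_pos (by simpa using hc)]
      simp
    · rw [if_neg hc, List.takeWhile_cons_of_neg (by simpa using hc)]
      simp only [List.map_nil, List.append_nil]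
      exact foldA_no_append c i es result (fun x hx hxc => hc (he x hx hxc))

-- B's while-loop characterised by takeWhile/dropWhile (no sortedness needed)
theorem altWhile_eq (c i : Int) (l : List Int) (result : List Int) :
    altWhile c i l result
      = (result ++ (l.takeWhile (· ≤ c)).map (fun _ => i), l.dropWhile (· ≤ c)) := by
  induction l generalizing result with
  | nil => simp [altWhile]
  | cons e es ih =>
    by_cases hc : e ≤ c
    · rw [altWhile, if_pos hc, ih, List.takeWhile_cons_of_pos (by simpa using hc),
        List.dropWhile_cons_of_pos (by simpa using hc)]
      simp
    · rw [altWhile, if_neg hc, List.takeWhile_cons_of_neg (by simpa using hc),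
        List.dropWhile_cons_of_neg (by simpa using hc)]
      simp

-- dropWhile as a drop (used to push B's suffix pointer through insert)
theorem drop_takeWhile_length (l : List Int) (p : Int → Bool) :
    l.drop (l.takeWhile p).length = l.dropWhile p := by
  induction l with
  | nil => simp
  | cons e es ih =>
    by_cases h : p e
    · simp [List.takeWhile_cons_of_pos h, List.dropWhile_cons_of_pos h, ih]
    · simp [List.takeWhile_cons_of_neg h, List.dropWhile_cons_of_neg h]

-- main loop correspondence: B's suffix pointer equals insert.drop result.length throughout
theorem outer_eq (insert : List Int) :
    ∀ (cs : List Int), (∀ c ∈ cs, List.Pairwise (fun a b => b ≤ c → a ≤ c) insert) →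
    ∀ (i : Int) (result : List Int),
      searchsortedOuter insert cs i result
          = (altOuter cs i (insert.drop result.length) result).1
      ∧ (altOuter cs i (insert.drop result.length) result).2
          = insert.drop ((altOuter cs i (insert.drop result.length) result).1).length := by
  intro cs
  induction cs with
  | nil => intro _ i result; exact ⟨rfl, rfl⟩
  | cons compared cs ih =>
    intro hins i result
    have hslice : PySem.List.slice insert (some (result.length : Int)) none
        = insert.drop result.length := PySem.List.slice_from_natCast insert result.length
    have hsorted : List.Pairwise (fun a b => b ≤ compared → a ≤ compared)
        (insert.drop result.length) :=
      (hins compared (by simp)).sublist (List.drop_sublist _ _)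
    have hfold := foldA_prefix compared i (insert.drop result.length) result hsorted
    set result' := result ++ ((insert.drop result.length).takeWhile (· ≤ compared)).map
        (fun _ => i) with hres'
    have hlen : insert.drop result'.length
        = (insert.drop result.length).dropWhile (· ≤ compared) := by
      rw [← drop_takeWhile_length (insert.drop result.length) (· ≤ compared), List.drop_drop]
      congr 1
      simp [hres']
    have hstep : altOuter (compared :: cs) i (insert.drop result.length) result
        = altOuter cs (i + 1) (insert.drop result'.length) result' := by
      simp only [altOuter, altWhile_eq, hres']
      rw [← hres', hlen]
    have := ih (fun c hc => hins c (by simp [hc])) (i + 1) result'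
    refine ⟨?_, ?_⟩
    · rw [searchsortedOuter, hslice, hfold, hstep]
      exact this.1
    · rw [hstep]
      exact this.2

-- ===== VERDICT (by name: the statement is the Claim_ definition above) =====
theorem searchsorted_spec : Claim_equal_searchsorted := by
  intro insert target _ hpre
  unfold Spec_searchsorted searchsorted searchsorted_alt
  obtain ⟨h1, h2⟩ := outer_eq insert target hpre 0 []
  simp only [List.length_nil, List.drop_zero] at h1 h2
  simp only [h1, h2, List.length_drop]
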